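-- pv_equiv track=rewrite | github.com/Lightwing-Ng/PythonPractiseATM | core/FinacialFormat.py | formatCardNum
-- ===== SOURCE A (Python) =====
-- def formatCardNum(num):
--     num = str(num)
--     result = ''
--     count = 0
--     for i in num[::-1]:
--         count += 1
--         result += i
--         if count % 4 == 0:
--             result += ' '
--     return result[::-1].strip(' ')
-- ===== SOURCE B (Python) =====
-- def formatCardNum(num):
--     s = str(num)
--     chunks = []
--     i = len(s)
--     while i > 0:
--         chunks.append(s[max(0, i - 4):i])
--         i -= 4
--     return ' '.join(reversed(chunks))
-- ===== Notes on version B (the rewrite author's own statement) =====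
-- stated objective: simpler
-- what changed: Replaces A's reverse-the-string / per-character counter loop with space insertions / reverse-again / strip pipeline by directly slicing four-character chunks off the right end of str(num) and joining them with ' '.
import Mathlib
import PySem

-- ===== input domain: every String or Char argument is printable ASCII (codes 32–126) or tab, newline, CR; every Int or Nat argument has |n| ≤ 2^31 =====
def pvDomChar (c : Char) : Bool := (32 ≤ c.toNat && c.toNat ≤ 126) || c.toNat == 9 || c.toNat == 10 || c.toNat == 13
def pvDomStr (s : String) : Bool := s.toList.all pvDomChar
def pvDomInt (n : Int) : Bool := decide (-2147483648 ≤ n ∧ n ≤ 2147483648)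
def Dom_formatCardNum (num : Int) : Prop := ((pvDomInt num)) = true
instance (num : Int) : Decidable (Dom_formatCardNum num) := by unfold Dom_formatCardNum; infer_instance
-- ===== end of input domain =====

-- B replaces A's reverse/counter/append-spaces/reverse/strip loop by slicing 4-char chunks
-- off the right end and joining them with ' ' (objective: simpler; same return value).

-- ===== PORT A =====
-- str ops are ported on List Char (PySem.Chars); the final return is String.ofList of the chars.
def formatCardNum (num : Int) : String :=
  let cs := PySem.Int.toChars num                      -- num = str(num)
  let rev := (PySem.List.slice? cs none none (-1)).getD []   -- num[::-1] (step -1 never raises)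
  let st := rev.foldl (fun (st : Int × List Char) i =>
      let count := st.1 + 1
      let result := st.2 ++ [i]
      if PySem.Int.mod count 4 == 0 then (count, result ++ [' ']) else (count, result))
    (0, [])
  String.ofList (PySem.Chars.stripChars ((PySem.List.slice? st.2 none none (-1)).getD []) [' '])
  -- result[::-1].strip(' ')

-- ===== PORT B =====
-- while i > 0: chunks.append(s[max(0, i - 4):i]); i -= 4
def altChunksAux (cs : List Char) (i : Nat) : List (List Char) :=
  if _h : i = 0 then []
  else PySem.List.slice cs (some (max 0 ((i : Int) - 4))) (some (i : Int)) :: altChunksAux cs (i - 4)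
termination_by i
decreasing_by omega

def formatCardNum_alt (num : Int) : String :=
  let cs := PySem.Int.toChars num                      -- s = str(num)
  String.ofList (PySem.Chars.join [' '] (altChunksAux cs cs.length).reverse)  -- ' '.join(reversed(chunks))

-- ===== PRECONDITION & SPEC =====
def Spec_formatCardNum (num : Int) (out : String) : Prop := out = formatCardNum_alt num
instance (num : Int) (out : String) : Decidable (Spec_formatCardNum num out) := by unfold Spec_formatCardNum; infer_instance

-- ===== CLAIM (what is proved, stated in full; the proofs are below) =====
def Claim_equal_formatCardNum : Prop := ∀ (num : Int), Dom_formatCardNum num → Spec_formatCardNum num (formatCardNum num)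

-- ===== LEMMAS AND PROOFS =====

-- What A's loop appends: each char, plus a ' ' after every 4th (count starts at k).
def bodyA (k : Int) : List Char → List Char
  | [] => []
  | c :: t => (c :: (if PySem.Int.mod (k + 1) 4 == 0 then [' '] else [])) ++ bodyA (k + 1) t

-- B's joined chunk list, as a function of the char list.
def joinB (cs : List Char) : List Char :=
  PySem.Chars.join [' '] (altChunksAux cs cs.length).reverse

lemma foldA (r : List Char) : ∀ (k : Int) (acc : List Char),
    (r.foldl (fun (st : Int × List Char) i =>
      let count := st.1 + 1
      let result := st.2 ++ [i]
      if PySem.Int.mod count 4 == 0 then (count, result ++ [' ']) else (count, result))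
      (k, acc)).2 = acc ++ bodyA k r := by
  induction r with
  | nil => intro k acc; simp [bodyA]
  | cons c t ih =>
    intro k acc
    rw [List.foldl_cons]
    by_cases h : PySem.Int.mod (k + 1) 4 = 0
    · have hc : (PySem.Int.mod (k + 1) 4 == 0) = true := by
        rw [beq_iff_eq]; exact h
      simp only [hc, if_true, ih, bodyA]
      simp
    · have hc : (PySem.Int.mod (k + 1) 4 == 0) = false := by
        rw [beq_eq_false_iff_ne]; exact h
      simp only [hc, Bool.false_eq_true, if_false, ih, bodyA]
      simp

lemma bodyA_shift (r : List Char) : ∀ k : Int, bodyA (k + 4) r = bodyA k r := by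
  induction r with
  | nil => intro k; rfl
  | cons c t ih =>
    intro k
    have hm : (PySem.Int.mod (k + 4 + 1) 4 == 0) = (PySem.Int.mod (k + 1) 4 == 0) := by
      rw [PySem.Int.mod_eq_emod_of_pos (by omega : (0:Int) < 4),
        PySem.Int.mod_eq_emod_of_pos (by omega : (0:Int) < 4)]
      congr 1
      omega
    have h4 : k + 4 + 1 = k + 1 + 4 := by ring
    rw [bodyA, bodyA, hm, h4, ih]

lemma bodyA_block (d4 d3 d2 d1 : Char) (r : List Char) :
    bodyA 0 (d4 :: d3 :: d2 :: d1 :: r) = d4 :: d3 :: d2 :: d1 :: ' ' :: bodyA 0 r := by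
  have hs : bodyA 4 r = bodyA 0 r := by
    rw [show (4:Int) = 0 + 4 by ring, bodyA_shift]
  rw [bodyA, bodyA, bodyA, bodyA]
  norm_num [hs]

lemma bodyA_small (r : List Char) (h : r.length ≤ 3) : bodyA 0 r = r := by
  match r, h with
  | [], _ => rfl
  | [a], _ => simp [bodyA]
  | [a, b], _ => simp [bodyA]
  | [a, b, c], _ => simp [bodyA]

lemma max_zero_sub_cast (i : Nat) : max 0 ((i : Int) - 4) = ((i - 4 : Nat) : Int) := by
  omega

lemma altChunksAux_take (j : Nat) : ∀ i, i ≤ j → ∀ cs : List Char,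
    altChunksAux (cs.take j) i = altChunksAux cs i := by
  intro i
  induction i using Nat.strong_induction_on with
  | _ i ih =>
    intro hij cs
    have hslice : ∀ l : List Char,
        PySem.List.slice l (some (max 0 ((i : Int) - 4))) (some (i : Int))
          = (l.drop (i - 4)).take (i - (i - 4)) := by
      intro l
      rw [max_zero_sub_cast, PySem.List.slice_natCast]
    rw [altChunksAux]
    conv_rhs => rw [altChunksAux]
    by_cases h0 : i = 0
    · simp [h0]
    · simp only [h0, dite_false]
      congr 1
      · rw [hslice, hslice, List.drop_take, List.take_take,
          min_eq_left (by omega : i - (i - 4) ≤ j - (i - 4))]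
      · exact ih (i - 4) (by omega) (by omega) cs

lemma altChunksAux_ne_nil (cs : List Char) (i : Nat) (h : i ≠ 0) : altChunksAux cs i ≠ [] := by
  rw [altChunksAux]; simp [h]

lemma join_snoc (l : List (List Char)) (t : List Char) (h : l ≠ []) :
    PySem.Chars.join [' '] (l ++ [t]) = PySem.Chars.join [' '] l ++ ' ' :: t := by
  induction l with
  | nil => exact absurd rfl h
  | cons x l ih =>
    cases l with
    | nil => simp [PySem.Chars.join_cons_cons, PySem.Chars.join_singleton]
    | cons y l =>
      rw [show (x :: y :: l) ++ [t] = x :: (y :: (l ++ [t])) from rfl,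
        PySem.Chars.join_cons_cons]
      rw [show (y :: (l ++ [t])) = (y :: l) ++ [t] from rfl, ih (by simp),
        PySem.Chars.join_cons_cons]
      simp

lemma main_lemma (n : Nat) : ∀ cs : List Char, cs.length = n → cs ≠ [] →
    (bodyA 0 cs.reverse).reverse = (if n % 4 = 0 then [' '] else []) ++ joinB cs
    ∧ (joinB cs).head? = cs.head? ∧ (joinB cs).getLast? = cs.getLast? := by
  induction n using Nat.strong_induction_on with
  | _ n ih =>
    intro cs hlen hne
    have hn0 : n ≠ 0 := by
      intro h; exact hne (List.eq_nil_of_length_eq_zero (hlen.trans h))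
    by_cases hsmall : n ≤ 3
    · -- fewer than 4 chars: one chunk, no space anywhere
      have hchunks : altChunksAux cs n = [cs] := by
        rw [altChunksAux]
        simp only [hn0, dite_false]
        rw [max_zero_sub_cast, PySem.List.slice_natCast]
        have h4 : n - 4 = 0 := by omega
        rw [h4, altChunksAux]
        simp [← hlen]
      have hB : joinB cs = cs := by
        rw [joinB, hlen, hchunks]
        simp [PySem.Chars.join_singleton]
      refine ⟨?_, by rw [hB], by rw [hB]⟩
      rw [bodyA_small _ (by simp [hlen, hsmall]), List.reverse_reverse, hB,
        if_neg (by omega)]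
      simp
    · -- n ≥ 4: peel the last 4 chars
      have hn4 : 4 ≤ n := by omega
      set m := n - 4 with hm
      set cs' := cs.take m with hcs'
      set t := cs.drop m with ht
      have hsplit : cs' ++ t = cs := List.take_append_drop m cs
      have htlen : t.length = 4 := by
        rw [ht, List.length_drop, hlen]; omega
      obtain ⟨d1, d2, d3, d4, hteq⟩ : ∃ d1 d2 d3 d4, t = [d1, d2, d3, d4] := by
        match t, htlen with
        | [d1, d2, d3, d4], _ => exact ⟨d1, d2, d3, d4, rfl⟩
      have hrev : cs.reverse = d4 :: d3 :: d2 :: d1 :: cs'.reverse := by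
        rw [← hsplit, List.reverse_append, hteq]; rfl
      have hA : (bodyA 0 cs.reverse).reverse
          = (bodyA 0 cs'.reverse).reverse ++ ' ' :: t := by
        rw [hrev, bodyA_block, hteq]; simp
      have hchunks : altChunksAux cs n = t :: altChunksAux cs' m := by
        rw [altChunksAux]
        simp only [hn0, dite_false]
        rw [max_zero_sub_cast, PySem.List.slice_natCast, ← hm]
        congr 1
        · rw [← ht]
          have : n - m = 4 := by omega
          rw [this, ← htlen, List.take_length]
        · rw [← altChunksAux_take m m le_rfl cs, ← hcs']
      by_cases hm0 : m = 0
      · -- exactly 4 chars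
        have hcs'nil : cs' = [] := by
          rw [hcs', hm0]; simp
        have hB : joinB cs = t := by
          rw [joinB, hlen, hchunks, hm0, altChunksAux]
          simp [PySem.Chars.join_singleton]
        have hcst : cs = t := by rw [← hsplit, hcs'nil]; rfl
        refine ⟨?_, by rw [hB, hcst], by rw [hB, hcst]⟩
        rw [hA, hB, if_pos (by omega), hcs'nil]
        simp [bodyA]
      · -- more than 4 chars: recurse on cs'
        have hcs'len : cs'.length = m := by
          rw [hcs', List.length_take, hlen]; omega
        have hcs'ne : cs' ≠ [] := by
          intro h
          rw [h] at hcs'len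
          exact hm0 hcs'len.symm
        obtain ⟨ihA, ihH, ihL⟩ := ih m (by omega) cs' hcs'len hcs'ne
        have hchne : altChunksAux cs' m ≠ [] := altChunksAux_ne_nil cs' m hm0
        have hB : joinB cs = joinB cs' ++ ' ' :: t := by
          rw [joinB, hlen, hchunks, List.reverse_cons,
            join_snoc _ _ (by simpa using hchne), joinB, hcs'len]
        have hBne : joinB cs' ≠ [] := by
          intro h
          rw [h] at ihH
          rcases List.exists_cons_of_ne_nil hcs'ne with ⟨a, al, haeq⟩
          rw [haeq] at ihH
          simp at ihH
        have hmod : n % 4 = m % 4 := by omega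
        refine ⟨?_, ?_, ?_⟩
        · rw [hA, hB, ihA, hmod]
          simp
        · rw [hB, ← hsplit]
          rcases List.exists_cons_of_ne_nil hBne with ⟨b, bl, hbeq⟩
          rcases List.exists_cons_of_ne_nil hcs'ne with ⟨a, al, haeq⟩
          rw [hbeq, haeq] at ihH ⊢
          simpa using ihH
        · rw [hB, ← hsplit, hteq, List.getLast?_append, List.getLast?_append]
          simp

lemma toChars_ne_nil (num : Int) : PySem.Int.toChars num ≠ [] := by
  rw [PySem.Int.toChars]
  split
  · simp
  · exact List.ne_nil_of_length_pos Nat.length_toDigits_pos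

lemma toChars_no_space (num : Int) : ∀ c ∈ PySem.Int.toChars num, c ≠ ' ' := by
  intro c hc
  rw [PySem.Int.toChars] at hc
  have hdig : ∀ {k : Nat}, c ∈ Nat.toDigits 10 k → c ≠ ' ' := by
    intro k hk he
    have := Nat.isDigit_of_mem_toDigits (by omega) (by omega) hk
    rw [he] at this
    exact absurd this (by decide)
  split at hc
  · rcases List.mem_cons.mp hc with h | h
    · rw [h]; decide
    · exact hdig h
  · exact hdig hc

lemma dropWhile_eq_self_of_head (p : Char → Bool) (l : List Char)
    (h : ∀ c, l.head? = some c → p c = false) : l.dropWhile p = l := by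
  cases l with
  | nil => rfl
  | cons a t =>
    rw [List.dropWhile_cons_of_neg]
    simp [h a rfl]

lemma stripChars_space_id (l : List Char)
    (hh : ∀ c, l.head? = some c → c ≠ ' ') (hl : ∀ c, l.getLast? = some c → c ≠ ' ') :
    PySem.Chars.stripChars l [' '] = l := by
  rw [PySem.Chars.stripChars]
  have h1 : l.dropWhile (fun c => [' '].contains c) = l := by
    apply dropWhile_eq_self_of_head
    intro c hc
    simpa using hh c hc
  rw [h1]
  have h2 : l.reverse.dropWhile (fun c => [' '].contains c) = l.reverse := by
    apply dropWhile_eq_self_of_head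
    intro c hc
    rw [List.head?_reverse] at hc
    simpa using hl c hc
  rw [h2, List.reverse_reverse]

lemma head_mem_ne_space (cs l : List Char) (hno : ∀ c ∈ cs, c ≠ ' ')
    (h : l.head? = cs.head?) : ∀ c, l.head? = some c → c ≠ ' ' := by
  intro c hc
  rw [h] at hc
  exact hno c (List.mem_of_mem_head? hc)

lemma getLast_mem_ne_space (cs l : List Char) (hno : ∀ c ∈ cs, c ≠ ' ')
    (h : l.getLast? = cs.getLast?) : ∀ c, l.getLast? = some c → c ≠ ' ' := by
  intro c hc
  rw [h] at hc
  exact hno c (List.mem_of_getLast? hc)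

-- ===== VERDICT (by name: the statement is the Claim_ definition above) =====
theorem formatCardNum_spec : Claim_equal_formatCardNum := by
  intro num _
  unfold Spec_formatCardNum formatCardNum formatCardNum_alt
  simp only [PySem.List.slice?_none_none_neg_one, Option.getD_some]
  set cs := PySem.Int.toChars num with hcs
  obtain ⟨hA, hH, hL⟩ :=
    main_lemma cs.length cs rfl (toChars_ne_nil num)
  rw [foldA]
  simp only [List.nil_append]
  rw [show (bodyA 0 cs.reverse).reverse
        = (if cs.length % 4 = 0 then [' '] else []) ++ joinB cs from hA]
  have hno := toChars_no_space num
  have hhB := head_mem_ne_space cs (joinB cs) hno hH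
  have hlB := getLast_mem_ne_space cs (joinB cs) hno hL
  have hstrip : PySem.Chars.stripChars (joinB cs) [' '] = joinB cs :=
    stripChars_space_id _ hhB hlB
  split
  · -- leading space stripped
    rw [show ([' '] ++ joinB cs) = ' ' :: joinB cs from rfl]
    rw [PySem.Chars.stripChars]
    rw [List.dropWhile_cons_of_pos (by simp)]
    rw [PySem.Chars.stripChars] at hstrip
    rw [hstrip]
    rfl
  · rw [List.nil_append, hstrip]
    rfl
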